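-- pv_equiv track=rewrite | github.com/0x11111111/CBCTReconstructionICP | x64/Release/test_cbct_jaw_registration_module.py | find_valid_indices
-- ===== SOURCE A (Python) =====
-- def find_valid_indices(positive_indices):
--     n = len(positive_indices)
--     if n < 4:
--         return [], None, None  # 如果列表长度小于4，无法找到四个连续的数值
--
--     # 找到第一个包含四个连续递增数值的子序列
--     start = None
--     for i in range(n - 3):
--         if (positive_indices[i + 1] == positive_indices[i] + 1 and
--                 positive_indices[i + 2] == positive_indices[i] + 2 and
--                 positive_indices[i + 3] == positive_indices[i] + 3):
--             start = i
--             break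
--
--     # 找到第一个包含四个连续递减数值的子序列
--     end = None
--     for i in range(n - 1, 2, -1):
--         if (positive_indices[i] == positive_indices[i - 1] + 1 and
--                 positive_indices[i - 1] == positive_indices[i - 2] + 1 and
--                 positive_indices[i - 2] == positive_indices[i - 3] + 1):
--             end = i
--             break
--
--     if start is not None and end is not None and start < end:
--         complete_subsequence = positive_indices[start:end + 1]
--         return complete_subsequence, min(complete_subsequence), max(complete_subsequence)
--     else:
--         return [], None, None
-- ===== SOURCE B (Python) =====
-- def find_valid_indices(positive_indices):
--     n = len(positive_indices)
--     if n < 4: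
--         return [], None, None
--     run = 1
--     first_top = None
--     last_top = None
--     for i in range(1, n):
--         run = run + 1 if positive_indices[i] == positive_indices[i - 1] + 1 else 1
--         if run >= 4:
--             if first_top is None:
--                 first_top = i
--             last_top = i
--     if first_top is None:
--         return [], None, None
--     seg = positive_indices[first_top - 3:last_top + 1]
--     return seg, min(seg), max(seg)
-- ===== Notes on version B (the rewrite author's own statement) =====
-- stated objective: alternative
-- what changed: Replaced A's two separate directional scans (a forward search for the first 4-long consecutive run and a backward search for the last one) by a single forward pass maintaining a run-length counter that records the first and last position where the run reaches 4.
import Mathlib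
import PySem

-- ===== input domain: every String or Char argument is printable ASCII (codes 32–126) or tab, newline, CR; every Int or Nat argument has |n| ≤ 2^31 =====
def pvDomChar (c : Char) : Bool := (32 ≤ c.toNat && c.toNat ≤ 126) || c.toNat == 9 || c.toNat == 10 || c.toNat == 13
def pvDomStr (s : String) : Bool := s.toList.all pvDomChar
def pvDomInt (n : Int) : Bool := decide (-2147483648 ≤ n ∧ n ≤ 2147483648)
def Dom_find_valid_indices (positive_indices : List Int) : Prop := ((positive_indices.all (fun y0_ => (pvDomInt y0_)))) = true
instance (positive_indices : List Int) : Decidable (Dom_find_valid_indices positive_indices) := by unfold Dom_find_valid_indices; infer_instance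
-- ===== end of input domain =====

-- B replaces A's two directional scans (forward search for the first 4-run, backward search for the
-- last 4-run) by a single forward pass with a run-length counter; same result, same O(n) cost (alternative).


-- ===== PORT A =====
-- All loop indices in A are nonnegative and every access is in range (guarded by n ≥ 4 and the
-- range bounds), so Nat indices with `getD _ 0` are exact here.
-- the forward-loop condition: xs[i+1]==xs[i]+1 and xs[i+2]==xs[i]+2 and xs[i+3]==xs[i]+3
def fviCondFwd (xs : List Int) (i : Nat) : Bool :=
  xs.getD (i+1) 0 == xs.getD i 0 + 1 && xs.getD (i+2) 0 == xs.getD i 0 + 2 &&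
    xs.getD (i+3) 0 == xs.getD i 0 + 3

-- the backward-loop condition: xs[i]==xs[i-1]+1 and xs[i-1]==xs[i-2]+1 and xs[i-2]==xs[i-3]+1
def fviCondBwd (xs : List Int) (i : Nat) : Bool :=
  xs.getD i 0 == xs.getD (i-1) 0 + 1 && xs.getD (i-1) 0 == xs.getD (i-2) 0 + 1 &&
    xs.getD (i-2) 0 == xs.getD (i-3) 0 + 1

def find_valid_indices (positive_indices : List Int) : List Int × Option Int × Option Int :=
  let n := positive_indices.length
  if n < 4 then ([], none, none)
  else
    -- for i in range(n-3): if cond: start = i; break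
    let start := (List.range (n - 3)).find? (fviCondFwd positive_indices)
    -- for i in range(n-1, 2, -1): if cond: end = i; break   (scans [n-1, …, 3])
    let stop := (List.range' 3 (n - 3)).reverse.find? (fviCondBwd positive_indices)
    match start, stop with
    | some s, some e =>
      if s < e then
        -- positive_indices[s:e+1]; exact since 0 ≤ s and e < n
        let sub := (positive_indices.drop s).take (e + 1 - s)
        (sub, PySem.List.min? sub (fun x => x), PySem.List.max? sub (fun x => x))
      else ([], none, none)
    | _, _ => ([], none, none)

-- ===== PORT B =====
-- positive_indices[i] == positive_indices[i-1] + 1 (indices in range at every use)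
def fviStep (xs : List Int) (i : Nat) : Bool := xs.getD i 0 == xs.getD (i-1) 0 + 1

def find_valid_indices_alt (positive_indices : List Int) : List Int × Option Int × Option Int :=
  let n := positive_indices.length
  if n < 4 then ([], none, none)
  else
    -- one pass: run counter, first/last position where the run reaches length 4
    let st := (List.range' 1 (n - 1)).foldl
      (fun (s : Nat × Option Nat × Option Nat) i =>
        let run := if fviStep positive_indices i then s.1 + 1 else 1
        if 4 ≤ run then (run, some (s.2.1.getD i), some i) else (run, s.2.1, s.2.2))
      (1, none, none)
    match st.2.1 with
    | none => ([], none, none)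
    | some f =>
      -- last_top is set whenever first_top is; `.getD 0` is only a totalization default
      let l := st.2.2.getD 0
      -- positive_indices[f-3 : l+1]
      let seg := (positive_indices.drop (f - 3)).take (l + 1 - (f - 3))
      (seg, PySem.List.min? seg (fun x => x), PySem.List.max? seg (fun x => x))

-- ===== PRECONDITION & SPEC =====
def Spec_find_valid_indices (positive_indices : List Int) (out : List Int × Option Int × Option Int) : Prop := out = find_valid_indices_alt positive_indices
instance (positive_indices : List Int) (out : List Int × Option Int × Option Int) : Decidable (Spec_find_valid_indices positive_indices out) := by unfold Spec_find_valid_indices; infer_instance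

-- ===== CLAIM (what is proved, stated in full; the proofs are below) =====
def Claim_equal_find_valid_indices : Prop := ∀ (positive_indices : List Int), Dom_find_valid_indices positive_indices → Spec_find_valid_indices positive_indices (find_valid_indices positive_indices)

-- ===== LEMMAS AND PROOFS =====

-- t is the top index of a 4-long consecutive run ending at t
def fviGood (xs : List Int) (t : Nat) : Bool :=
  decide (3 ≤ t) && fviStep xs t && fviStep xs (t-1) && fviStep xs (t-2)

-- the tops of all 4-long runs inside [3, n-1], in increasing order
def fviTops (xs : List Int) (n : Nat) : List Nat :=
  (List.range' 3 (n - 3)).filter (fviGood xs)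

-- common middle form of both programs
def fviMid (xs : List Int) : List Int × Option Int × Option Int :=
  if xs.length < 4 then ([], none, none)
  else
    match (fviTops xs xs.length).head? with
    | none => ([], none, none)
    | some f =>
      let l := (fviTops xs xs.length).getLast?.getD 0
      let seg := (xs.drop (f - 3)).take (l + 1 - (f - 3))
      (seg, PySem.List.min? seg (fun x => x), PySem.List.max? seg (fun x => x))

-- length of the consecutive run ending at index k
def fviStreak (xs : List Int) : Nat → Nat
  | 0 => 1
  | k+1 => if fviStep xs (k+1) then fviStreak xs k + 1 else 1

lemma fviStreak_le (xs : List Int) (k : Nat) : fviStreak xs k ≤ k + 1 := by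
  induction k with
  | zero => simp [fviStreak]
  | succ k ih => simp only [fviStreak]; split_ifs <;> omega

lemma fviStreak_pos (xs : List Int) (k : Nat) : 1 ≤ fviStreak xs k := by
  cases k with
  | zero => simp [fviStreak]
  | succ k => simp only [fviStreak]; split_ifs <;> omega

lemma good_iff_streak (xs : List Int) (k : Nat) :
    (4 ≤ fviStreak xs k) ↔ fviGood xs k = true := by
  by_cases hk : 3 ≤ k
  · obtain ⟨m, rfl⟩ : ∃ m, k = m + 3 := ⟨k - 3, by omega⟩
    have h0 := fviStreak_pos xs m
    simp only [fviGood, Bool.and_eq_true, decide_eq_true_eq]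
    show (4 ≤ fviStreak xs (m+3)) ↔ _
    simp only [fviStreak]
    have e1 : m + 3 - 1 = m + 2 := by omega
    have e2 : m + 3 - 2 = m + 1 := by omega
    rw [e1, e2]
    split_ifs <;> simp_all
  · have hle := fviStreak_le xs k
    constructor
    · intro h; exfalso; omega
    · intro h
      simp only [fviGood, Bool.and_eq_true, decide_eq_true_eq] at h
      exact absurd h.1.1.1 hk

lemma condFwd_eq_good (xs : List Int) (i : Nat) :
    fviCondFwd xs i = fviGood xs (i+3) := by
  apply Bool.eq_iff_iff.mpr
  simp only [fviCondFwd, fviGood, fviStep, Bool.and_eq_true, beq_iff_eq, decide_eq_true_eq]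
  have e1 : i + 3 - 1 = i + 2 := by omega
  have e2 : i + 3 - 2 = i + 1 := by omega
  have e3 : i + 2 - 1 = i + 1 := by omega
  have e4 : i + 1 - 1 = i := by omega
  rw [e1, e2, e3, e4]
  constructor
  · rintro ⟨⟨h1, h2⟩, h3⟩; refine ⟨⟨⟨by omega, by omega⟩, by omega⟩, by omega⟩
  · rintro ⟨⟨⟨_, h3⟩, h2⟩, h1⟩; refine ⟨⟨by omega, by omega⟩, by omega⟩

lemma condBwd_eq_good (xs : List Int) (i : Nat) (hi : 3 ≤ i) :
    fviCondBwd xs i = fviGood xs i := by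
  have e1 : i - 1 - 1 = i - 2 := by omega
  have e2 : i - 2 - 1 = i - 3 := by omega
  simp [fviCondBwd, fviGood, fviStep, e1, e2, hi]

-- A's forward search, expressed through fviTops
lemma startA_eq (xs : List Int) (n : Nat) :
    ((List.range (n - 3)).find? (fviCondFwd xs)).map (· + 3) = (fviTops xs n).head? := by
  have hr : List.range' 3 (n - 3) = (List.range (n - 3)).map (· + 3) := by
    rw [List.range'_eq_map_range]; simp [Nat.add_comm]
  rw [fviTops, List.head?_filter, hr, List.find?_map]
  have : (fviGood xs ∘ fun x => x + 3) = fviCondFwd xs := by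
    funext i; simp [Function.comp, condFwd_eq_good]
  rw [this]

-- A's backward search, expressed through fviTops
lemma stopA_eq (xs : List Int) (n : Nat) :
    (List.range' 3 (n - 3)).reverse.find? (fviCondBwd xs) = (fviTops xs n).getLast? := by
  rw [fviTops, ← List.head?_filter, List.filter_reverse, List.head?_reverse]
  congr 1
  apply List.filter_congr
  intro a ha
  exact condBwd_eq_good xs a (List.mem_range'_1.mp ha).1

-- the single-pass fold of B computes the streak and the head/last of fviTops so far
lemma foldB_eq (xs : List Int) (k : Nat) :
    (List.range' 1 k).foldl
      (fun (s : Nat × Option Nat × Option Nat) i =>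
        let run := if fviStep xs i then s.1 + 1 else 1
        if 4 ≤ run then (run, some (s.2.1.getD i), some i) else (run, s.2.1, s.2.2))
      (1, none, none)
    = (fviStreak xs k,
       ((List.range' 3 (k + 1 - 3)).filter (fviGood xs)).head?,
       ((List.range' 3 (k + 1 - 3)).filter (fviGood xs)).getLast?) := by
  induction k with
  | zero => simp [fviStreak]
  | succ k ih =>
    have hcat : List.range' 1 (k+1) = List.range' 1 k ++ [k+1] := by
      have := List.range'_concat (step := 1) (s := 1) (n := k)
      simpa [Nat.add_comm] using this
    rw [hcat, List.foldl_append, ih]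
    simp only [List.foldl_cons, List.foldl_nil]
    have hrun : (if fviStep xs (k+1) then fviStreak xs k + 1 else 1) = fviStreak xs (k+1) := by
      simp [fviStreak]
    rw [hrun]
    by_cases hg : fviGood xs (k+1) = true
    · have h4 : 4 ≤ fviStreak xs (k+1) := (good_iff_streak xs (k+1)).mpr hg
      have hk2 : 3 ≤ k + 1 := by
        by_contra h
        simp [fviGood] at hg
        omega
      have hcat2 : List.range' 3 (k + 2 - 3) = List.range' 3 (k + 1 - 3) ++ [k+1] := by
        have e : k + 2 - 3 = (k + 1 - 3) + 1 := by omega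
        rw [e, List.range'_concat (step := 1) (s := 3) (n := k+1-3)]
        congr 2
        omega
      rw [if_pos h4, hcat2, List.filter_append]
      simp only [List.filter_cons, hg, if_true, List.filter_nil, Prod.mk.injEq]
      refine ⟨trivial, ?_, ?_⟩
      · cases (List.range' 3 (k + 1 - 3)).filter (fviGood xs) with
        | nil => simp
        | cons a t => simp
      · simp
    · have h4 : ¬ 4 ≤ fviStreak xs (k+1) := fun h => hg ((good_iff_streak xs (k+1)).mp h)
      rw [if_neg h4]
      -- filtered lists for k+1 and k+2 agree: the only possible new element is k+1, and it is not good
      have hsame : (List.range' 3 (k + 2 - 3)).filter (fviGood xs)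
          = (List.range' 3 (k + 1 - 3)).filter (fviGood xs) := by
        by_cases hk : 3 ≤ k + 1
        · have e : k + 2 - 3 = (k + 1 - 3) + 1 := by omega
          rw [e, List.range'_concat (step := 1) (s := 3) (n := k+1-3), List.filter_append]
          have e2 : 3 + 1 * (k + 1 - 3) = k + 1 := by omega
          rw [e2]
          simp [hg]
        · have e1 : k + 2 - 3 = 0 := by omega
          have e2 : k + 1 - 3 = 0 := by omega
          simp [e1, e2]
      rw [hsame]

-- sorted head is ≤ every member
lemma head?_le_of_pairwise (l : List Nat) (f x : Nat)
    (hp : List.Pairwise (· < ·) l) (hh : l.head? = some f) (hx : x ∈ l) : f ≤ x := by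
  cases l with
  | nil => simp at hh
  | cons a t =>
    simp at hh
    subst hh
    rcases List.mem_cons.mp hx with h | h
    · omega
    · exact Nat.le_of_lt ((List.pairwise_cons.mp hp).1 x h)

lemma tops_pairwise (xs : List Int) (n : Nat) : List.Pairwise (· < ·) (fviTops xs n) := by
  have : List.Pairwise (· < ·) (List.range' 3 (n - 3)) := by
    simpa using List.pairwise_lt_range' (s := 3) (n := n - 3)
  exact this.sublist List.filter_sublist

lemma tops_mem_ge (xs : List Int) (n : Nat) (x : Nat) (hx : x ∈ fviTops xs n) : 3 ≤ x :=
  (List.mem_range'_1.mp (List.mem_of_mem_filter hx)).1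

-- A equals the middle form
lemma A_eq_mid (xs : List Int) : find_valid_indices xs = fviMid xs := by
  unfold find_valid_indices fviMid
  by_cases hn : xs.length < 4
  · simp [hn]
  · simp only [hn, if_false]
    rw [stopA_eq xs xs.length]
    cases hh : (fviTops xs xs.length).head? with
    | none =>
      -- head? = none forces find? = none via startA_eq
      have h1 := startA_eq xs xs.length
      rw [hh] at h1
      have h2 : (List.range (xs.length - 3)).find? (fviCondFwd xs) = none := by
        cases hc : (List.range (xs.length - 3)).find? (fviCondFwd xs) with
        | none => rfl
        | some s => rw [hc] at h1; simp at h1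
      have hl : (fviTops xs xs.length).getLast? = none := by
        cases htl : fviTops xs xs.length with
        | nil => simp
        | cons a t => rw [htl] at hh; simp at hh
      rw [h2, hl]
    | some f =>
      have h1 := startA_eq xs xs.length
      rw [hh] at h1
      obtain ⟨s, hs, hsf⟩ : ∃ s, (List.range (xs.length - 3)).find? (fviCondFwd xs) = some s ∧ s + 3 = f := by
        cases hc : (List.range (xs.length - 3)).find? (fviCondFwd xs) with
        | none => rw [hc] at h1; simp at h1
        | some s => rw [hc] at h1; simp at h1; exact ⟨s, rfl, h1⟩
      have hl : ∃ l, (fviTops xs xs.length).getLast? = some l := by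
        cases hgl : (fviTops xs xs.length).getLast? with
        | some l => exact ⟨l, rfl⟩
        | none =>
          rw [List.getLast?_eq_none_iff] at hgl
          rw [hgl] at hh; simp at hh
      obtain ⟨l, hl⟩ := hl
      have hlmem : l ∈ fviTops xs xs.length := List.mem_of_getLast? hl
      have hfl : f ≤ l := head?_le_of_pairwise _ f l (tops_pairwise xs xs.length) hh hlmem
      have hf3 : 3 ≤ f := tops_mem_ge xs xs.length f (List.mem_of_mem_head? (by simp [hh]))
      rw [hs, hl]
      have hse : s < l := by omega
      simp only [hse, if_true]
      have : s = f - 3 := by omega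
      subst this
      rfl

-- B equals the middle form
lemma B_eq_mid (xs : List Int) : find_valid_indices_alt xs = fviMid xs := by
  unfold find_valid_indices_alt fviMid
  by_cases hn : xs.length < 4
  · simp [hn]
  · simp only [hn, if_false]
    rw [foldB_eq xs (xs.length - 1)]
    have e : xs.length - 1 + 1 - 3 = xs.length - 3 := by omega
    rw [e]
    rfl

-- ===== VERDICT (by name: the statement is the Claim_ definition above) =====
theorem find_valid_indices_spec : Claim_equal_find_valid_indices := by
  intro xs _
  unfold Spec_find_valid_indices
  rw [A_eq_mid, B_eq_mid]
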